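-- pv_equiv track=rewrite | github.com/Prabhjyot045/aegis_lights | aegislights-controller/graph_manager/graph_utils.py | _aggregate_lane_data_to_edges
-- ===== SOURCE A (Python) =====
-- from typing import Dict, List, Tuple, Optional
--
-- def _aggregate_lane_data_to_edges(lane_vehicle_count: Dict[str, int],
--                                   lane_waiting_count: Dict[str, int]) -> Dict[str, Dict]:
--     """
--     Aggregate lane-level data into edge-level metrics.
--
--     CityFlow lanes are named like "AB_0", "AB_1". We sum them into "AB".
--
--     Args:
--         lane_vehicle_count: Dict of lane_id -> vehicle count
--         lane_waiting_count: Dict of lane_id -> waiting vehicle count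
--
--     Returns:
--         Dict of edge_id -> {queue, waiting, delay, ...}
--     """
--     edge_aggregates = {}
--
--     for lane_id, vehicle_count in lane_vehicle_count.items():
--         # Extract edge_id from lane_id (e.g., "AB_0" -> "AB")
--         edge_id = lane_id.rsplit('_', 1)[0] if '_' in lane_id else lane_id
--
--         waiting_count = lane_waiting_count.get(lane_id, 0)
--
--         if edge_id not in edge_aggregates:
--             edge_aggregates[edge_id] = {
--                 'total_vehicles': 0,
--                 'total_waiting': 0,
--                 'lane_count': 0
--             }
--
--         edge_aggregates[edge_id]['total_vehicles'] += vehicle_count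
--         edge_aggregates[edge_id]['total_waiting'] += waiting_count
--         edge_aggregates[edge_id]['lane_count'] += 1
--
--     return edge_aggregates
-- ===== SOURCE B (Python) =====
-- def _aggregate_lane_data_to_edges(lane_vehicle_count, lane_waiting_count):
--     # Pass 1: group the lane items by their edge id (first-seen insertion order).
--     groups = {}
--     for lane_id, vehicle_count in lane_vehicle_count.items():
--         edge_id = lane_id.rsplit('_', 1)[0] if '_' in lane_id else lane_id
--         groups.setdefault(edge_id, []).append((lane_id, vehicle_count))
--     # Pass 2: summarize each group into the three edge-level metrics.
--     return {
--         edge_id: {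
--             'total_vehicles': sum(c for _, c in lanes),
--             'total_waiting': sum(lane_waiting_count.get(l, 0) for l, _ in lanes),
--             'lane_count': len(lanes),
--         }
--         for edge_id, lanes in groups.items()
--     }
-- ===== Notes on version B (the rewrite author's own statement) =====
-- stated objective: alternative
-- what changed: Replaces A's single interleaved loop that mutates three counters inside a dict-of-dicts with a two-pass index-build-then-summarize: first group lane items by edge id, then build each edge's metrics by summing its group.
import Mathlib
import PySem

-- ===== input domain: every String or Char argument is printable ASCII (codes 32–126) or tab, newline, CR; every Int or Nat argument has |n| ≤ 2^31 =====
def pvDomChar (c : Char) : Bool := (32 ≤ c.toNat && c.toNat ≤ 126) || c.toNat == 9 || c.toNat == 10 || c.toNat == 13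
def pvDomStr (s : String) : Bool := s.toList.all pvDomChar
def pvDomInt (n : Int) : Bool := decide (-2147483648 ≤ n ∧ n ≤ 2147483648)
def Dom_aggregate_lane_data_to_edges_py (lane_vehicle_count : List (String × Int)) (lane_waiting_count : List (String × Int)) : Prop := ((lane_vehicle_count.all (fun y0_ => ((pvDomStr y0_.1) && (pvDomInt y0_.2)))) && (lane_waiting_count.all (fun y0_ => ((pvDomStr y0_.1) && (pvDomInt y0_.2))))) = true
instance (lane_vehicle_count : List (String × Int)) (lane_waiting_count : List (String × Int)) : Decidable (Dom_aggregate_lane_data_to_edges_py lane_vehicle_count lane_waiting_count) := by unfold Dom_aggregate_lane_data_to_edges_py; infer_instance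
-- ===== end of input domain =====

-- ===== PORT A =====
-- B rebuilds the same edge metrics by grouping lane items per edge first and summarizing second (alternative decomposition, same O(n) cost).

-- edge_id = lane_id.rsplit('_', 1)[0] if '_' in lane_id else lane_id
-- exact: when '_' occurs in s, s.rsplit('_', 1)[0] == s[:s.rfind('_')]
def pvEdgeId (s : String) : String :=
  if PySem.Str.isIn "_" s then PySem.Str.slice s none (some (PySem.Str.rfind s "_")) else s

-- the loop body of A (one iteration over (lane_id, vehicle_count))
def pvStepA (lane_waiting_count : List (String × Int))
    (agg : PySem.Dict String (PySem.Dict String Int)) (p : String × Int) :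
    PySem.Dict String (PySem.Dict String Int) :=
  let edge_id := pvEdgeId p.1
  let waiting_count := (PySem.Dict.mk lane_waiting_count).getD p.1 0
  let agg := if agg.contains edge_id then agg else
    agg.insert edge_id (PySem.Dict.ofList [("total_vehicles", (0 : Int)), ("total_waiting", 0), ("lane_count", 0)])
  let agg := agg.modify edge_id PySem.Dict.empty (fun m => m.modify "total_vehicles" 0 (· + p.2))
  let agg := agg.modify edge_id PySem.Dict.empty (fun m => m.modify "total_waiting" 0 (· + waiting_count))
  agg.modify edge_id PySem.Dict.empty (fun m => m.modify "lane_count" 0 (· + 1))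

def aggregate_lane_data_to_edges_py (lane_vehicle_count : List (String × Int)) (lane_waiting_count : List (String × Int)) : List (String × List (String × Int)) :=
  ((lane_vehicle_count.foldl (pvStepA lane_waiting_count) PySem.Dict.empty).items.map
    (fun q => (q.1, q.2.items)))

-- ===== PORT B =====
-- pass 1 loop body: groups.setdefault(edge_id, []).append((lane_id, vehicle_count))
def pvGroupStep (g : PySem.Dict String (List (String × Int))) (p : String × Int) :
    PySem.Dict String (List (String × Int)) :=
  g.insert (pvEdgeId p.1) (g.getD (pvEdgeId p.1) [] ++ [p])

-- pass 2: one edge's metrics dict from its grouped lane items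
def pvSummarize (lane_waiting_count : List (String × Int)) (lanes : List (String × Int)) :
    List (String × Int) :=
  [("total_vehicles", (lanes.map Prod.snd).sum),
   ("total_waiting", (lanes.map (fun r => (PySem.Dict.mk lane_waiting_count).getD r.1 0)).sum),
   ("lane_count", (lanes.length : Int))]

def aggregate_lane_data_to_edges_py_alt (lane_vehicle_count : List (String × Int)) (lane_waiting_count : List (String × Int)) : List (String × List (String × Int)) :=
  ((lane_vehicle_count.foldl pvGroupStep PySem.Dict.empty).items.map
    (fun q => (q.1, pvSummarize lane_waiting_count q.2)))

-- ===== PRECONDITION & SPEC =====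
def Spec_aggregate_lane_data_to_edges_py (lane_vehicle_count : List (String × Int)) (lane_waiting_count : List (String × Int)) (out : List (String × List (String × Int))) : Prop := out = aggregate_lane_data_to_edges_py_alt lane_vehicle_count lane_waiting_count
instance (lane_vehicle_count : List (String × Int)) (lane_waiting_count : List (String × Int)) (out : List (String × List (String × Int))) : Decidable (Spec_aggregate_lane_data_to_edges_py lane_vehicle_count lane_waiting_count out) := by unfold Spec_aggregate_lane_data_to_edges_py; infer_instance

-- ===== CLAIM (what is proved, stated in full; the proofs are below) =====
def Claim_equal_aggregate_lane_data_to_edges_py : Prop := ∀ (lane_vehicle_count : List (String × Int)) (lane_waiting_count : List (String × Int)), Dom_aggregate_lane_data_to_edges_py lane_vehicle_count lane_waiting_count → Spec_aggregate_lane_data_to_edges_py lane_vehicle_count lane_waiting_count (aggregate_lane_data_to_edges_py lane_vehicle_count lane_waiting_count)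

-- ===== LEMMAS AND PROOFS =====

-- abbreviation used only by the proofs: B's grouping dict re-read as A's dict-of-dicts
def pvToAgg (lwc : List (String × Int)) (g : PySem.Dict String (List (String × Int))) :
    PySem.Dict String (PySem.Dict String Int) :=
  PySem.Dict.mk (g.items.map (fun q => (q.1, PySem.Dict.mk (pvSummarize lwc q.2))))

theorem pv_get?_replace {v1 : Type} (M : List (String × v1)) (e : String) (v : v1)
    (h : M.any (fun r => r.1 == e) = true) :
    (PySem.Dict.mk (M.map (fun r => if r.1 == e then (e, v) else r))).get? e = some v := by
  induction M with
  | nil => simp at h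
  | cons a M ih =>
    by_cases ha : a.1 = e
    · simp [PySem.Dict.get?, ha]
    · have h' : (M.any (fun r => r.1 == e)) = true := by simpa [ha] using h
      simpa [PySem.Dict.get?, ha] using ih h'

theorem pv_replace_replace {v1 : Type} (M : List (String × v1)) (e : String) (a b : v1) :
    ((M.map (fun r => if r.1 == e then (e, a) else r)).map (fun r => if r.1 == e then (e, b) else r))
      = M.map (fun r => if r.1 == e then (e, b) else r) := by
  rw [List.map_map]
  apply List.map_congr_left
  intro r _
  by_cases h : r.1 = e <;> simp [h]

theorem pv_contains_toAgg (lwc : List (String × Int)) (g : PySem.Dict String (List (String × Int)))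
    (e : String) : (pvToAgg lwc g).contains e = g.contains e := by
  simp only [pvToAgg, PySem.Dict.contains, PySem.Dict.items, List.any_map]
  rfl

-- reducing A's three-modify chain on one edge's literal metrics dict
theorem pv_inner (S W n v w : Int) :
    ((((PySem.Dict.mk [("total_vehicles", S), ("total_waiting", W), ("lane_count", n)]).modify
        "total_vehicles" 0 (· + v)).modify "total_waiting" 0 (· + w)).modify "lane_count" 0 (· + 1))
      = PySem.Dict.mk [("total_vehicles", S + v), ("total_waiting", W + w), ("lane_count", n + 1)] := by
  simp [PySem.Dict.modify, PySem.Dict.insert, PySem.Dict.getD, PySem.Dict.get?,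
        PySem.Dict.contains]

theorem pv_any_map_fst {v1 v2 : Type} (M : List (String × v1)) (e : String)
    (F : String × v1 → String × v2) (hF : ∀ r, (F r).1 = r.1) :
    (M.map F).any (fun r => r.1 == e) = M.any (fun r => r.1 == e) := by
  induction M with
  | nil => rfl
  | cons a M ih => simp only [List.map_cons, List.any_cons, ih, hF]

-- modify at a key whose first match is known: items become a pointwise replacement
theorem pv_modify_get {v1 : Type} (d : PySem.Dict String v1) (e : String) (m0 : v1)
    (dflt : v1) (f : v1 → v1) (h : d.get? e = some m0) :
    d.modify e dflt f
      = PySem.Dict.mk (d.items.map (fun r => if r.1 == e then (e, f m0) else r)) := by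
  have hc : d.contains e = true := by
    rw [PySem.Dict.contains_eq_isSome_get?, h]; rfl
  rw [PySem.Dict.modify, PySem.Dict.getD_eq_get?_getD, h]
  apply PySem.Dict.ext
  rw [PySem.Dict.items_insert_of_contains _ _ hc]
  rfl

theorem pv_map_fresh {v1 : Type} (M : List (String × v1)) (e : String) (v : v1)
    (h : M.any (fun r => r.1 == e) = false) :
    M.map (fun r => if r.1 == e then (e, v) else r) = M := by
  induction M with
  | nil => rfl
  | cons a M ih =>
    simp only [List.any_cons, Bool.or_eq_false_iff] at h
    rw [List.map_cons, ih h.2, h.1]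
    simp

theorem pv_get?_append_fresh {v1 : Type} (M : List (String × v1)) (e : String) (u : v1)
    (h : M.any (fun r => r.1 == e) = false) :
    (PySem.Dict.mk (M ++ [(e, u)])).get? e = some u := by
  have hM : M.find? (fun r => r.1 == e) = none := by
    rw [List.find?_eq_none]
    intro r hr hx
    have hT : (M.any (fun r => r.1 == e)) = true := List.any_eq_true.2 ⟨r, hr, hx⟩
    rw [hT] at h
    exact absurd h (by simp)
  simp [PySem.Dict.get?, List.find?_append, hM]

theorem pv_step_comm (lwc : List (String × Int)) (g : PySem.Dict String (List (String × Int)))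
    (p : String × Int) :
    pvStepA lwc (pvToAgg lwc g) p = pvToAgg lwc (pvGroupStep g p) := by
  unfold pvStepA pvGroupStep
  dsimp only
  have hF : ∀ r : String × List (String × Int),
      ((fun q => (q.1, PySem.Dict.mk (pvSummarize lwc q.2))) r).1 = r.1 := fun r => rfl
  set e := pvEdgeId p.1 with he
  set w := (PySem.Dict.mk lwc).getD p.1 0 with hw
  set F : String × List (String × Int) → String × PySem.Dict String Int :=
    fun q => (q.1, PySem.Dict.mk (pvSummarize lwc q.2)) with hFdef
  by_cases hc : g.contains e = true
  · -- the edge key is already present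
    have hcs : (g.items.any (fun r => r.1 == e)) = true := hc
    obtain ⟨q, hq⟩ : ∃ q, g.items.find? (fun r => r.1 == e) = some q := by
      cases hfind : g.items.find? (fun r => r.1 == e) with
      | some q => exact ⟨q, rfl⟩
      | none =>
        rw [List.find?_eq_none] at hfind
        obtain ⟨r, hr, hx⟩ := List.any_eq_true.1 hcs
        exact absurd hx (hfind r hr)
    have hgetD : g.getD e [] = q.2 := by
      rw [PySem.Dict.getD_eq_get?_getD, PySem.Dict.get?, hq]; rfl
    have hanyM : ((g.items.map F).any (fun r => r.1 == e)) = true := by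
      rw [pv_any_map_fst _ _ _ hF]; exact hcs
    have hgetA : (pvToAgg lwc g).get? e = some (PySem.Dict.mk (pvSummarize lwc q.2)) := by
      rw [pvToAgg, PySem.Dict.get?]
      show ((List.find? (fun r => r.1 == e) (g.items.map F)).map Prod.snd) = _
      rw [List.find?_map]
      rw [show ((fun (r : String × PySem.Dict String Int) => r.1 == e) ∘ F)
            = (fun (r : String × List (String × Int)) => r.1 == e) from rfl, hq]
      rfl
    rw [pv_contains_toAgg, hc, if_pos rfl, pv_modify_get _ _ _ _ _ hgetA]
    have hitems : (pvToAgg lwc g).items = g.items.map F := rfl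
    rw [hitems]
    rw [pv_modify_get _ e _ PySem.Dict.empty _
      (pv_get?_replace (g.items.map F) e _ hanyM)]
    have hitems2 : ∀ L : List (String × PySem.Dict String Int),
        (PySem.Dict.mk L).items = L := fun _ => rfl
    rw [hitems2, pv_replace_replace]
    rw [pv_modify_get _ e _ PySem.Dict.empty _
      (pv_get?_replace (g.items.map F) e _ hanyM)]
    rw [hitems2, pv_replace_replace]
    rw [hgetD, pvToAgg]
    have hins : (g.insert e (q.2 ++ [p])).items
        = g.items.map (fun r => if r.1 == e then (e, q.2 ++ [p]) else r) :=
      PySem.Dict.items_insert_of_contains _ _ hc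
    rw [hins]
    show PySem.Dict.mk _ = PySem.Dict.mk _
    congr 1
    rw [List.map_map, List.map_map]
    apply List.map_congr_left
    intro r hr
    by_cases hre : r.1 = e
    · show (if (F r).1 == e then _ else F r) = F (if r.1 == e then (e, q.2 ++ [p]) else r)
      rw [hF r]
      simp only [hre, beq_self_eq_true, if_true]
      show (e, _) = (e, PySem.Dict.mk (pvSummarize lwc (q.2 ++ [p])))
      refine congrArg _ ?_
      show ((((PySem.Dict.mk (pvSummarize lwc q.2)).modify "total_vehicles" 0 (· + p.2)).modify
          "total_waiting" 0 (· + w)).modify "lane_count" 0 (· + 1)) = _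
      rw [show pvSummarize lwc q.2
            = [("total_vehicles", (q.2.map Prod.snd).sum),
               ("total_waiting", (q.2.map (fun r => (PySem.Dict.mk lwc).getD r.1 0)).sum),
               ("lane_count", (q.2.length : Int))] from rfl, pv_inner]
      simp [pvSummarize, hw]
    · show (if (F r).1 == e then _ else F r) = F (if r.1 == e then (e, q.2 ++ [p]) else r)
      rw [hF r]
      simp [hre]
  · -- fresh edge key
    have hcf : g.contains e = false := by simpa using hc
    have hcfs : (g.items.any (fun r => r.1 == e)) = false := hcf
    have hanyMf : ((g.items.map F).any (fun r => r.1 == e)) = false := by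
      rw [pv_any_map_fst _ _ _ hF]; exact hcfs
    have hgetD : g.getD e [] = [] := PySem.Dict.getD_of_not_contains _ _ hcf
    have hcA : (pvToAgg lwc g).contains e = false := by rw [pv_contains_toAgg]; exact hcf
    have hins : (pvToAgg lwc g).insert e
        (PySem.Dict.ofList [("total_vehicles", (0 : Int)), ("total_waiting", 0), ("lane_count", 0)])
        = PySem.Dict.mk (g.items.map F ++ [(e, PySem.Dict.mk
            [("total_vehicles", (0 : Int)), ("total_waiting", 0), ("lane_count", 0)])]) := by
      apply PySem.Dict.ext
      rw [PySem.Dict.items_insert_of_not_contains _ _ hcA]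
      rfl
    rw [pv_contains_toAgg, hcf, if_neg (by simp), hins]
    have step : ∀ (u : PySem.Dict String Int) (dflt : PySem.Dict String Int)
        (f : PySem.Dict String Int → PySem.Dict String Int),
        (PySem.Dict.mk (g.items.map F ++ [(e, u)])).modify e dflt f
          = PySem.Dict.mk (g.items.map F ++ [(e, f u)]) := by
      intro u dflt f
      rw [pv_modify_get _ e u dflt f (pv_get?_append_fresh _ _ _ hanyMf)]
      rw [List.map_append, pv_map_fresh _ _ _ hanyMf]
      simp
    rw [step, step, step, hgetD, pvToAgg]
    have hins2 : (g.insert e ([] ++ [p])).items = g.items ++ [(e, [] ++ [p])] :=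
      PySem.Dict.items_insert_of_not_contains _ _ hcf
    rw [hins2, List.map_append]
    rw [pv_inner]
    show PySem.Dict.mk _ = PySem.Dict.mk _
    congr 1
    congr 1
    simp [pvSummarize, hw]
theorem pv_fold_comm (lwc : List (String × Int)) (l : List (String × Int))
    (g : PySem.Dict String (List (String × Int))) :
    l.foldl (pvStepA lwc) (pvToAgg lwc g) = pvToAgg lwc (l.foldl pvGroupStep g) := by
  induction l generalizing g with
  | nil => rfl
  | cons p l ih => rw [List.foldl_cons, List.foldl_cons, pv_step_comm, ih]

-- ===== VERDICT (by name: the statement is the Claim_ definition above) =====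
theorem aggregate_lane_data_to_edges_py_spec : Claim_equal_aggregate_lane_data_to_edges_py := by
  intro lvc lwc _
  show _ = _
  unfold aggregate_lane_data_to_edges_py aggregate_lane_data_to_edges_py_alt
  have h0 : (PySem.Dict.empty : PySem.Dict String (PySem.Dict String Int)) = pvToAgg lwc PySem.Dict.empty := rfl
  rw [h0, pv_fold_comm]
  simp [pvToAgg, List.map_map]
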